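-- pv_equiv track=rewrite | github.com/ganapathy-r-balaji/ipl-predictor | agents/prep_dashboard_v2.py | distribute_overs
-- ===== SOURCE A (Python) =====
-- def distribute_overs(n_bowlers, total=20):
--     """Distribute 20 overs across n bowlers (max 4 each)."""
--     shares = []
--     per = total // n_bowlers
--     rem = total - per * n_bowlers
--     for i in range(n_bowlers):
--         o = min(4, per + (1 if i < rem else 0))
--         shares.append(o)
--     return shares
-- ===== SOURCE B (Python) =====
-- def distribute_overs(n_bowlers, total=20):
--     """Deal overs one bowler at a time: the next bowler gets the ceiling share
--     of whatever total remains (capped at 4 in the output), then repeat with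
--     one fewer bowler and the reduced total."""
--     shares = []
--     n, t = n_bowlers, total
--     while n > 0:
--         share = -(-t // n)
--         shares.append(min(4, share))
--         t -= share
--         n -= 1
--     return shares
-- ===== Notes on version B (the rewrite author's own statement) =====
-- stated objective: alternative
-- what changed: Replaces A's quotient/remainder precomputation and index loop with a per-index conditional by a subtract-as-you-go dealing loop: each iteration hands the next bowler the ceiling share -(-t//n) of the remaining total, then shrinks both the total and the bowler count; no rem and no index comparison exist in B.
import Mathlib
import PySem

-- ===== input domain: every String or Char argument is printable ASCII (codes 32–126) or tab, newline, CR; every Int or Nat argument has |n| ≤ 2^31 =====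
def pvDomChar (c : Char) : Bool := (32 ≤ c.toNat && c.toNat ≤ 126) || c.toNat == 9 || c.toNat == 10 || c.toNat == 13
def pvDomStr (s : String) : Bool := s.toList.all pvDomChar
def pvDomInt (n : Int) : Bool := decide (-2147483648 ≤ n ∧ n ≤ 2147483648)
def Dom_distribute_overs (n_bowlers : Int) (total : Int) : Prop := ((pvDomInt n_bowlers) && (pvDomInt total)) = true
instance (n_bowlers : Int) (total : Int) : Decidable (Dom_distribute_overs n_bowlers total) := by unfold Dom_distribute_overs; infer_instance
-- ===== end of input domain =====

-- B deals overs one bowler at a time: a while loop in which the next bowler gets the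
-- (capped) ceiling share of the remaining total, which is then reduced; no
-- quotient/remainder precomputation and no per-index conditional.

-- ===== PORT A =====
def distribute_overs (n_bowlers : Int) (total : Int) : List Int :=
  let per := PySem.Int.floordiv total n_bowlers
  let rem := total - per * n_bowlers
  (PySem.List.pyRange 0 n_bowlers 1).foldl
    (fun shares i => shares ++ [min 4 (per + (if i < rem then 1 else 0))]) []

-- ===== PORT B =====
-- the while loop of Source B, state (n, t, shares)
def distributeLoop (n : Int) (t : Int) (shares : List Int) : List Int :=
  if 0 < n then
    let share := -(PySem.Int.floordiv (-t) n)
    distributeLoop (n - 1) (t - share) (shares ++ [min 4 share])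
  else shares
termination_by n.toNat
decreasing_by omega

def distribute_overs_alt (n_bowlers : Int) (total : Int) : List Int :=
  distributeLoop n_bowlers total []

-- ===== PRECONDITION & SPEC =====
-- Pre_ excludes exactly n_bowlers = 0, where A raises ZeroDivisionError.
def Pre_distribute_overs (n_bowlers : Int) (total : Int) : Prop := n_bowlers ≠ 0
instance (n_bowlers : Int) (total : Int) : Decidable (Pre_distribute_overs n_bowlers total) := by unfold Pre_distribute_overs; infer_instance
def pvWitness_distribute_overs : Int × Int := (5, 20)

def Spec_distribute_overs (n_bowlers : Int) (total : Int) (out : List Int) : Prop := out = distribute_overs_alt n_bowlers total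
instance (n_bowlers : Int) (total : Int) (out : List Int) : Decidable (Spec_distribute_overs n_bowlers total out) := by unfold Spec_distribute_overs; infer_instance

-- ===== CLAIM (what is proved, stated in full; the proofs are below) =====
def Claim_equal_distribute_overs : Prop := ∀ (n_bowlers : Int) (total : Int), Dom_distribute_overs n_bowlers total → Pre_distribute_overs n_bowlers total → Spec_distribute_overs n_bowlers total (distribute_overs n_bowlers total)

-- ===== LEMMAS AND PROOFS =====

-- the common block shape both programs produce for positive n
def pvBlock (n total : Int) : List Int :=
  List.replicate (PySem.Int.mod total n).toNat (min 4 (PySem.Int.floordiv total n + 1)) ++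
    List.replicate (n - PySem.Int.mod total n).toNat (min 4 (PySem.Int.floordiv total n))

theorem map_range_block (n rem per : Int) (h0 : 0 ≤ rem) (h1 : rem ≤ n) :
    (PySem.List.pyRange 0 n 1).map (fun i => min 4 (per + if i < rem then 1 else 0))
      = List.replicate rem.toNat (min 4 (per + 1)) ++ List.replicate (n - rem).toNat (min 4 per) := by
  rw [PySem.List.pyRange_one_append 0 rem n h0 h1, List.map_append]
  congr 1
  · rw [List.map_congr_left (fun i hi => by
      have hm := PySem.List.mem_pyRange_one.mp hi
      rw [if_pos hm.2])]
    rw [List.map_const', PySem.List.length_pyRange_one, Int.sub_zero]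
  · rw [List.map_congr_left (fun i hi => by
      have hm := PySem.List.mem_pyRange_one.mp hi
      rw [if_neg (by omega : ¬ i < rem), Int.add_zero])]
    rw [List.map_const', PySem.List.length_pyRange_one]

theorem a_block (n total : Int) (h : 0 < n) :
    distribute_overs n total = pvBlock n total := by
  unfold distribute_overs pvBlock
  dsimp only
  rw [PySem.List.foldl_append_singleton_eq_map, List.nil_append]
  have hmod : total - PySem.Int.floordiv total n * n = PySem.Int.mod total n := by
    have := PySem.Int.floordiv_mul_add_mod total n
    omega
  rw [hmod]
  have hge := PySem.Int.mod_nonneg (a := total) h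
  have hlt := PySem.Int.mod_lt (a := total) h
  exact map_range_block n _ _ (by omega) (by omega)

theorem b_block (m : Nat) : ∀ (n t : Int) (shares : List Int), n.toNat ≤ m → 0 < n →
    distributeLoop n t shares = shares ++ pvBlock n t := by
  induction m with
  | zero => intro n t shares hle hpos; omega
  | succ m ih =>
    intro n t shares hle hpos
    have hper := PySem.Int.floordiv_mul_add_mod t n
    have hge := PySem.Int.mod_nonneg (a := t) hpos
    have hlt := PySem.Int.mod_lt (a := t) hpos
    set per := PySem.Int.floordiv t n with hperdef
    set r := PySem.Int.mod t n with hrdef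
    -- the ceiling share: -( (-t) // n ) = per + (1 if r > 0 else 0)
    have hshare : -(PySem.Int.floordiv (-t) n)
        = per + (if 0 < r then 1 else 0) := by
      rw [PySem.Int.neg_floordiv_neg_eq_iff_of_pos hpos]
      constructor
      · split_ifs with h0 <;> nlinarith
      · split_ifs with h0 <;> nlinarith
    rw [distributeLoop, if_pos hpos]
    dsimp only
    rw [hshare]
    by_cases h0 : 0 < r
    · rw [if_pos h0]
      -- remaining loop: n-1 bowlers, remaining t - (per+1); note 0 < n-1 since 0 < r < n
      have hn1 : (0:Int) < n - 1 := by omega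
      have hfd : PySem.Int.floordiv (t - (per + 1)) (n - 1) = per := by
        rw [PySem.Int.floordiv_eq_iff_of_pos hn1]
        constructor <;> nlinarith
      have hmd : PySem.Int.mod (t - (per + 1)) (n - 1) = r - 1 := by
        have := PySem.Int.floordiv_mul_add_mod (t - (per + 1)) (n - 1)
        rw [hfd] at this; nlinarith
      rw [ih (n - 1) (t - (per + 1)) (shares ++ [min 4 (per + 1)]) (by omega) hn1]
      unfold pvBlock
      rw [hfd, hmd, ← hrdef, ← hperdef]
      have h1 : r.toNat = (r - 1).toNat + 1 := by omega
      have h2 : (n - 1 - (r - 1)) = n - r := by omega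
      rw [h1, h2, List.replicate_succ]
      simp [List.append_assoc]
    · rw [if_neg h0]
      have hr0 : r = 0 := by omega
      unfold pvBlock
      rw [← hrdef, ← hperdef]
      have hrest : distributeLoop (n - 1) (t - (per + 0)) (shares ++ [min 4 (per + 0)])
          = (shares ++ [min 4 (per + 0)]) ++ List.replicate (n - 1).toNat (min 4 per) := by
        by_cases hn1 : n = 1
        · subst hn1
          rw [distributeLoop]
          norm_num
        · have hn1' : (0:Int) < n - 1 := by omega
          have hfd : PySem.Int.floordiv (t - (per + 0)) (n - 1) = per := by
            rw [PySem.Int.floordiv_eq_iff_of_pos hn1']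
            constructor <;> nlinarith
          have hmd : PySem.Int.mod (t - (per + 0)) (n - 1) = 0 := by
            have := PySem.Int.floordiv_mul_add_mod (t - (per + 0)) (n - 1)
            rw [hfd] at this; nlinarith
          rw [ih (n - 1) (t - (per + 0)) (shares ++ [min 4 (per + 0)]) (by omega) hn1']
          unfold pvBlock
          rw [hfd, hmd]
          norm_num
      rw [hrest, hr0]
      simp only [Int.add_zero, Int.toNat_zero, List.replicate_zero, List.nil_append,
        Int.sub_zero, List.append_assoc, List.singleton_append]
      have h3 : n.toNat = (n - 1).toNat + 1 := by omega
      rw [h3, List.replicate_succ]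

-- ===== VERDICT (by name: the statement is the Claim_ definition above) =====
theorem distribute_overs_spec : Claim_equal_distribute_overs := by
  intro n total _ hpre
  unfold Spec_distribute_overs
  rcases lt_or_gt_of_ne hpre with hneg | hpos
  · rw [distribute_overs_alt, distributeLoop, if_neg (by omega)]
    unfold distribute_overs
    dsimp only
    rw [PySem.List.pyRange_one_eq_nil (by omega)]
    rfl
  · rw [a_block n total hpos, distribute_overs_alt,
      b_block n.toNat n total [] le_rfl hpos, List.nil_append]
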